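-- pv_equiv track=rewrite | github.com/VitorRez/Algoritmos-bioinspirados | ColoniaFormigas_PCV/ColoniaDeFormigas_VítorRezendeSilva/ColoniaFormigas.py | set_feromonio
-- ===== SOURCE A (Python) =====
-- def set_feromonio(tam, f):
--     matriz = []
--     for i in range(tam):
--         aux = []
--         for j in range(tam):
--             if j != i:
--                 aux.append(f)
--             else:
--                 aux.append(0)
--         matriz.append(aux)
--     return matriz
-- ===== SOURCE B (Python) =====
-- def set_feromonio(tam, f):
--     # Generate the first row [0, f, f, ..., f] and obtain each following row
--     # by rotating the previous one right by one position: the single 0 walks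
--     # along the diagonal. No per-cell index comparison anywhere.
--     matriz = []
--     linha = [0] + [f] * (tam - 1)
--     for _ in range(tam):
--         matriz.append(linha)
--         linha = linha[-1:] + linha[:-1]
--     return matriz
-- ===== Notes on version B (the rewrite author's own statement) =====
-- stated objective: alternative
-- what changed: B computes only the first row [0,f,...,f] and derives every subsequent row by rotating the previous row right by one (the zero walks down the diagonal), instead of A's nested loops with a per-cell j != i test.
import Mathlib
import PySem

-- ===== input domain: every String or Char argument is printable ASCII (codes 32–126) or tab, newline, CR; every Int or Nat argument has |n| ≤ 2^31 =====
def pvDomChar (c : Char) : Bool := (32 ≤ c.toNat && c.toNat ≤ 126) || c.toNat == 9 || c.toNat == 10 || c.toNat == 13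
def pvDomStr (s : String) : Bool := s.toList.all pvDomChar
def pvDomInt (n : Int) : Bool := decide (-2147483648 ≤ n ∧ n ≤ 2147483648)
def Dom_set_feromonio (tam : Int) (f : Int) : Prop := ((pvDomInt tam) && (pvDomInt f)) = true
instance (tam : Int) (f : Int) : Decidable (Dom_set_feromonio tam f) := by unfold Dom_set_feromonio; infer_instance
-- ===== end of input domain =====

-- B generates only the first row [0,f,...,f] and derives each following row by rotating
-- the previous one right by one (the zero walks down the diagonal); objective: alternative.


-- ===== PORT A =====
def set_feromonio (tam : Int) (f : Int) : List (List Int) :=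
  (PySem.List.pyRange 0 tam).foldl
    (fun matriz i =>
      matriz ++ [ (PySem.List.pyRange 0 tam).foldl
        (fun aux j => aux ++ [if j ≠ i then f else 0]) [] ])
    []

-- ===== PORT B =====
-- linha[-1:] + linha[:-1] is the right rotation, ported with PySem.List.slice.
def set_feromonio_alt (tam : Int) (f : Int) : List (List Int) :=
  let linha0 : List Int := [0] ++ List.replicate (tam - 1).toNat f
  ((PySem.List.pyRange 0 tam).foldl
    (fun st _ => (st.1 ++ [st.2],
      PySem.List.slice st.2 (some (-1)) none ++ PySem.List.slice st.2 none (some (-1))))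
    (([] : List (List Int)), linha0)).1

-- ===== PRECONDITION & SPEC =====
def Spec_set_feromonio (tam : Int) (f : Int) (out : List (List Int)) : Prop := out = set_feromonio_alt tam f
instance (tam : Int) (f : Int) (out : List (List Int)) : Decidable (Spec_set_feromonio tam f out) := by unfold Spec_set_feromonio; infer_instance

-- ===== CLAIM =====
def Claim_equal_set_feromonio : Prop := ∀ (tam : Int) (f : Int), Dom_set_feromonio tam f → Spec_set_feromonio tam f (set_feromonio tam f)

-- ===== LEMMAS AND PROOFS =====

-- the common target: row k is k copies of f, then 0, then the remaining f's
def pvRow (n : Nat) (f : Int) (k : Nat) : List Int :=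
  List.replicate k f ++ 0 :: List.replicate (n - 1 - k) f

theorem pv_row_length (n : Nat) (f : Int) (k : Nat) (hk : k < n) :
    (pvRow n f k).length = n := by simp [pvRow]; omega

theorem pv_foldl_app {α β : Type} (g : α → β) :
    ∀ (l : List α) (init : List β),
      l.foldl (fun acc x => acc ++ [g x]) init = init ++ l.map g := by
  intro l
  induction l with
  | nil => simp
  | cons x xs ih => intro init; simp [List.foldl_cons, ih]

theorem pv_foldl_const {σ α : Type} (g : σ → σ) :
    ∀ (l : List α) (init : σ), l.foldl (fun s _ => g s) init = g^[l.length] init := by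
  intro l
  induction l with
  | nil => intro init; rfl
  | cons x xs ih =>
      intro init
      rw [List.foldl_cons, ih, List.length_cons, Function.iterate_succ_apply]

-- one right rotation sends row k to row (k+1), as long as the 0 is not yet last
theorem pv_rot_row (n : Nat) (f : Int) (k : Nat) (hk : k + 1 < n) :
    PySem.List.slice (pvRow n f k) (some (-1)) none ++
      PySem.List.slice (pvRow n f k) none (some (-1)) = pvRow n f (k + 1) := by
  rw [PySem.List.slice_from_neg_one, PySem.List.slice_to_neg_one]
  have hm : n - 1 - k = (n - 1 - (k + 1)) + 1 := by omega
  have hfront : pvRow n f k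
      = (List.replicate k f ++ 0 :: List.replicate (n - 1 - (k + 1)) f) ++ [f] := by
    unfold pvRow
    rw [hm, List.replicate_succ']
    simp
  rw [hfront]
  have hlen : (List.replicate k f ++ 0 :: List.replicate (n - 1 - (k + 1)) f).length = n - 1 := by
    simp; omega
  rw [List.dropLast_concat]
  have : ((List.replicate k f ++ 0 :: List.replicate (n - 1 - (k + 1)) f) ++ [f]).length - 1
      = (List.replicate k f ++ 0 :: List.replicate (n - 1 - (k + 1)) f).length := by
    simp
  rw [this, List.drop_left]
  show f :: (List.replicate k f ++ 0 :: List.replicate (n - 1 - (k + 1)) f) = _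
  unfold pvRow
  simp [List.replicate_succ]

theorem pv_row_get (n : Nat) (f : Int) (k j : Nat) (hk : k < n) (hj : j < n) :
    (pvRow n f k)[j]'(by rw [pv_row_length n f k hk]; exact hj)
      = if j = k then 0 else f := by
  unfold pvRow
  rcases lt_trichotomy j k with h | h | h
  · rw [List.getElem_append_left (by simp; omega)]
    simp [Nat.ne_of_lt h]
  · subst h
    rw [List.getElem_append_right (by simp)]
    simp
  · rw [List.getElem_append_right (by simp; omega)]
    rw [List.getElem_cons]
    simp [Nat.ne_of_gt h]
    omega

-- B's iterated rotation produces exactly the rows 0..n-1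
theorem pv_iter_spec (n : Nat) (f : Int) :
    ∀ (m k : Nat), k + m = n →
      ((fun (st : List (List Int) × List Int) => (st.1 ++ [st.2],
          PySem.List.slice st.2 (some (-1)) none ++
            PySem.List.slice st.2 none (some (-1))))^[m]
        ((List.range k).map (pvRow n f), pvRow n f k)).1
      = (List.range n).map (pvRow n f) := by
  intro m
  induction m with
  | zero => intro k hk; simp at hk; subst hk; rfl
  | succ m ih =>
      intro k hk
      rw [Function.iterate_succ_apply]
      have hrows : (List.range k).map (pvRow n f) ++ [pvRow n f k]
          = (List.range (k + 1)).map (pvRow n f) := by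
        rw [List.range_succ, List.map_append]; rfl
      cases m with
      | zero =>
          simp only [Function.iterate_zero, id_eq]
          show (List.range k).map (pvRow n f) ++ [pvRow n f k] = _
          rw [hrows]
          have : k + 1 = n := by omega
          rw [this]
      | succ m' =>
          have hk1 : k + 1 < n := by omega
          dsimp only
          rw [hrows, pv_rot_row n f k hk1]
          exact ih (k + 1) (by omega)

theorem pvB_eq (tam f : Int) :
    set_feromonio_alt tam f = (List.range tam.toNat).map (pvRow tam.toNat f) := by
  unfold set_feromonio_alt
  dsimp only
  by_cases h : tam ≤ 0
  · have hn : tam.toNat = 0 := by omega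
    have hr : PySem.List.pyRange 0 tam = [] := by
      rw [PySem.List.pyRange_one]
      simp
      omega
    rw [hr, hn]; rfl
  · rw [pv_foldl_const]
    have hlen : (PySem.List.pyRange 0 tam).length = tam.toNat := by
      rw [PySem.List.length_pyRange_one]; norm_num
    have h' : 0 < tam := by omega
    clear h
    have hrow0 : ([(0 : Int)] ++ List.replicate (tam - 1).toNat f) = pvRow tam.toNat f 0 := by
      unfold pvRow
      have : (tam - 1).toNat = tam.toNat - 1 - 0 := by omega
      rw [this]; rfl
    rw [hlen, hrow0]
    have : ((List.range 0).map (pvRow tam.toNat f), pvRow tam.toNat f 0)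
        = (([] : List (List Int)), pvRow tam.toNat f 0) := rfl
    rw [← this]
    exact pv_iter_spec tam.toNat f tam.toNat 0 (by omega)

theorem pvA_eq (tam f : Int) :
    set_feromonio tam f = (List.range tam.toNat).map (pvRow tam.toNat f) := by
  unfold set_feromonio
  rw [pv_foldl_app]
  have hlen : (PySem.List.pyRange 0 tam).length = tam.toNat := by
    rw [PySem.List.length_pyRange_one]; norm_num
  apply List.ext_getElem
  · simp [hlen]
  · intro i h1 h2
    simp only [List.nil_append, List.getElem_map, PySem.List.getElem_pyRange_one,
      List.getElem_range]
    have hi : i < tam.toNat := by simpa [hlen] using h1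
    rw [pv_foldl_app]
    apply List.ext_getElem
    · simp [hlen, pv_row_length tam.toNat f i hi]
    · intro j hj1 hj2
      have hjn : j < tam.toNat := by simpa [hlen] using hj1
      simp only [List.nil_append, List.getElem_map, PySem.List.getElem_pyRange_one]
      rw [pv_row_get tam.toNat f i j hi hjn]
      by_cases hij : j = i
      · subst hij; simp
      · have hne : (0 : Int) + (j : Int) ≠ 0 + (i : Int) := by omega
        rw [if_pos hne, if_neg hij]

-- ===== VERDICT =====
theorem set_feromonio_spec : Claim_equal_set_feromonio := by
  intro tam f _
  show set_feromonio tam f = set_feromonio_alt tam f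
  rw [pvA_eq, pvB_eq]
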